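-- pv_equiv track=rewrite | github.com/SAG145/Project-Euler | PEP200 - Prime-proof Squbes.py | all_squbes_200
-- ===== SOURCE A (Python) =====
-- import math
--
-- def all_primes_below_n(n):
--     primes_bool = [False, False] + [True] * (n - 2)
--     for k in range(2, int(math.sqrt(n)) + 1):
--         if primes_bool[k]:
--             for l in range(2*k,n,k):
--                 primes_bool[l] = False
--     primes_list = []
--     for k in range(n):
--         if primes_bool[k]:
--             primes_list.append(k)
--     return primes_list
--
-- def all_squbes_200(n):
--     psqu = all_primes_below_n(math.isqrt(n) + 1)
--     pcube = all_primes_below_n(math.floor(math.cbrt(n)) + 1)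
--     sqube200 = []
--     for p in psqu:
--         for q in pcube:
--             if p != q:
--                 s = p**2*q**3
--                 if "200" in str(s):
--                     sqube200.append(s)
--     sqube200.sort()
--     return sqube200
-- ===== SOURCE B (Python) =====
-- import math
--
--
-- def all_squbes_200(n):
--     def is_prime(k):
--         if k < 2:
--             return False
--         return all(k % d for d in range(2, math.isqrt(k) + 1))
--
--     def icbrt(m):
--         r = 0
--         while (r + 1) ** 3 <= m:
--             r += 1
--         return r
--
--     psqu = [p for p in range(math.isqrt(n) + 1) if is_prime(p)]
--     pcube = [q for q in range(icbrt(n) + 1) if is_prime(q)]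
--     return sorted(p ** 2 * q ** 3
--                   for p in psqu for q in pcube
--                   if p != q and "200" in str(p ** 2 * q ** 3))
-- ===== Notes on version B (the rewrite author's own statement) =====
-- stated objective: idiomatic
-- what changed: Replaces the hand-run boolean Eratosthenes sieve (allocate n flags, cross off multiples, then re-scan to collect) by a direct trial-division is_prime filter over a range, replaces the float math.cbrt by an exact integer cube root, and replaces the append-into-list-then-.sort() double loop by a single sorted() over a comprehension.
-- intended difference: On the 29 inputs n = p^3 (p prime, e.g. 50653 = 37^3) where C's double-precision math.cbrt(p^3) rounds just below p, A's floor(cbrt(n))+1 bound silently drops the prime p from its cube-prime list and A omits every sqube q^2*p^3 whose decimal contains '200' (at n=50653 A returns [200]); B uses the exact integer cube root and returns them ([200, 2005909453]), which is the intended bound cbrt(n). — e.g. on all_squbes_200(50653): A returns [200], B returns [200, 2005909453]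
import Mathlib
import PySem

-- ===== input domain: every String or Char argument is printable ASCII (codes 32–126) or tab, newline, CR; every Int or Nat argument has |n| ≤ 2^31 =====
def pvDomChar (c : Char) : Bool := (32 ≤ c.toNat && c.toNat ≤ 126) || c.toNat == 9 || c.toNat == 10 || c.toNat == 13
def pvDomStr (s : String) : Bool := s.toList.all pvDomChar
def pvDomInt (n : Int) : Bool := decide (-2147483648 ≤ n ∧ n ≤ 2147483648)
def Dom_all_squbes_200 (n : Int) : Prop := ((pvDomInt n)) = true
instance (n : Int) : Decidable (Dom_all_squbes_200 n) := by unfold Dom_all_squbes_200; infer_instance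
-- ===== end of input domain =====

-- B replaces A's boolean Eratosthenes sieve by a trial-division primality filter, A's
-- float math.cbrt bound by an exact integer cube root, and A's append-then-.sort()
-- double loop by one sorted() comprehension (objective: idiomatic; return value only).

-- ===== PORT A =====
-- math.isqrt(m), ported as the exact integer square root computed by a fuel-bounded
-- counting loop (m+1 units of fuel always suffice); shared by both ports.
def pvIsqrtAux (fuel : Nat) (m r : Nat) : Nat :=
  match fuel with
  | 0 => r
  | f + 1 => if (r + 1) * (r + 1) ≤ m then pvIsqrtAux f m (r + 1) else r

def pvIsqrt (m : Nat) : Nat := pvIsqrtAux (m + 1) m 0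

-- Eratosthenes sieve, transliterated.  int(math.sqrt(n)) is ported as Nat.sqrt: exact for
-- every argument this helper is reached with (all ≤ 46343, where the float sqrt is exact).
-- primes_bool[k] and primes_bool[l] = False are ported with getD/set: the indices are
-- always in range on the arguments reached (k ≤ int(sqrt(n)) < len, l < n = len).
def all_primes_below_n (n : Int) : List Int :=
  let arr0 : List Bool := [false, false] ++ List.replicate (n - 2).toNat true
  let arr :=
    (PySem.List.pyRange 2 ((pvIsqrt n.toNat : Int) + 1) 1).foldl
      (fun arr k =>
        if arr.getD k.toNat false then
          (PySem.List.pyRange (2 * k) n k).foldl (fun a l => a.set l.toNat false) arr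
        else arr)
      arr0
  (PySem.List.pyRange 0 n 1).foldl
    (fun acc k => if arr.getD k.toNat false then acc ++ [k] else acc) []

-- Hand port of math.floor(math.cbrt(n)) (a C double computation PySem does not cover):
-- on 0 ≤ n ≤ 2^31 the float result floors to the exact integer cube root everywhere
-- EXCEPT exactly these 148 perfect cubes, where CPython's cbrt lands one below the
-- exact root (verified exhaustively against CPython on this platform).
def pvBadCbrtCubes : List Int := [3375, 19683, 27000, 50653, 157464, 216000, 300763, 357911, 405224, 1259712, 1601613, 1685159, 1728000, 2406104, 2685619, 2863288, 3241792, 4173281, 6967871, 8615125, 10077696, 10793861, 11390625, 12008989, 12812904, 13312053, 13481272, 13651919, 13824000, 16194277, 19248832, 21484952, 22906304, 25934336, 31255875, 33386248, 55742968, 67419143, 68921000, 72511713, 80062991, 80621568, 84604519, 85766121, 86350888, 86938307, 88121125, 90518849, 91125000, 96071912, 100544625, 102503232, 106496424, 107171875, 107850176, 108531333, 109215352, 110592000, 111284641, 115501303, 125751501, 128787625, 129554216, 146363183, 153990656, 167284151, 171879616, 178453547, 182284263, 183250432, 207474688, 208527857, 250047000, 263374721, 267089984, 410172407, 423564751, 445943744,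 465484375, 494913671, 513922401, 539353144, 551368000, 569722789, 580093704, 629422793, 638277381, 640503928, 644972544, 651714363, 676836152, 679151439, 686128968, 690807104, 695506456, 704969000, 724150792, 729000000, 736314327, 741217625, 746142643, 766060875, 768575296, 786330467, 791453125, 796597983, 801765089, 804357000, 820025856, 849278123, 851971392, 857375000, 862801408, 868250664, 870983875, 873722816, 876467493, 884736000, 890277128, 904231063, 915498611, 924010424, 926859375, 949862087, 1006012008, 1030301000, 1036433728, 1051871913, 1064332261, 1083206683, 1095912791, 1170905464, 1231925248, 1338273208, 1375036928, 1427628376, 1454419637, 1458274104, 1466003456, 1647212741, 1659797504, 1668222856, 1784770597, 1948441249, 2000376000, 2092240639, 2106997768, 2136719872]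

def floorCbrtFloat (n : Int) : Int :=
  ((Nat.findGreatest (fun k => k ^ 3 ≤ n.toNat) 1291 : Nat) : Int) -
    (if n ∈ pvBadCbrtCubes then 1 else 0)

def all_squbes_200 (n : Int) : List Int :=
  let psqu := all_primes_below_n ((pvIsqrt n.toNat : Int) + 1)
  let pcube := all_primes_below_n (floorCbrtFloat n + 1)
  let sqube200 :=
    psqu.foldl (fun acc p =>
      pcube.foldl (fun acc q =>
        if p ≠ q then
          if PySem.Str.isIn "200" (PySem.Int.toStr (p ^ 2 * q ^ 3)) then acc ++ [p ^ 2 * q ^ 3]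
          else acc
        else acc) acc) []
  PySem.List.sorted sqube200 (fun x => x) false

-- ===== PORT B =====
-- trial-division primality: all(k % d for d in range(2, isqrt(k)+1))
def pv_is_prime (k : Int) : Bool :=
  if k < 2 then false
  else (PySem.List.pyRange 2 ((pvIsqrt k.toNat : Int) + 1) 1).all
    (fun d => !(PySem.Int.mod k d == 0))

-- while (r+1)**3 <= m: r += 1   (fuel-bounded while loop; m.toNat + 1 iterations suffice)
def pv_icbrtLoop (fuel : Nat) (m r : Int) : Int :=
  match fuel with
  | 0 => r
  | f + 1 => if (r + 1) ^ 3 ≤ m then pv_icbrtLoop f m (r + 1) else r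

def pv_icbrt (m : Int) : Int := pv_icbrtLoop (m.toNat + 1) m 0

def all_squbes_200_alt (n : Int) : List Int :=
  let psqu := (PySem.List.pyRange 0 ((pvIsqrt n.toNat : Int) + 1) 1).filter pv_is_prime
  let pcube := (PySem.List.pyRange 0 (pv_icbrt n + 1) 1).filter pv_is_prime
  PySem.List.sorted
    (psqu.flatMap (fun p =>
      (pcube.filter (fun q =>
          decide (p ≠ q) && PySem.Str.isIn "200" (PySem.Int.toStr (p ^ 2 * q ^ 3)))).map
        (fun q => p ^ 2 * q ^ 3)))
    (fun x => x) false

-- ===== PRECONDITION & SPEC =====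
-- math.isqrt(n) raises ValueError for n < 0 (in both A and B); Pre_ excludes exactly that.
def Pre_all_squbes_200 (n : Int) : Prop := 0 ≤ n
instance (n : Int) : Decidable (Pre_all_squbes_200 n) := by unfold Pre_all_squbes_200; infer_instance
def pvWitness_all_squbes_200 : Int := 10

-- On the 29 inputs n = p³ (p prime) where C's double-precision cbrt(p³) rounds just below
-- p, A's floor(cbrt(n))+1 bound silently drops the prime p from its cube-prime list and A
-- omits every sqube q²·p³ whose decimal contains '200'; B uses the exact integer cube
-- root and includes them, the intended behaviour.
def D_all_squbes_200 (n : Int) : Prop := n ∈ ([50653, 2685619, 6967871, 12008989, 13651919, 80062991, 84604519, 86938307, 90518849, 115501303, 178453547, 208527857, 263374721, 410172407, 423564751, 569722789, 629422793, 746142643, 801765089, 849278123, 904231063, 915498611, 949862087, 1064332261, 1095912791, 1647212741, 1784770597, 1948441249, 2092240639] : List Int)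
instance (n : Int) : Decidable (D_all_squbes_200 n) := by unfold D_all_squbes_200; infer_instance

def Spec_all_squbes_200 (n : Int) (out : List Int) : Prop := ¬ D_all_squbes_200 n → out = all_squbes_200_alt n
instance (n : Int) (out : List Int) : Decidable (Spec_all_squbes_200 n out) := by unfold Spec_all_squbes_200; infer_instance

def pvDiffWitness_all_squbes_200 : Int := 50653
def pvDiffWitnessOut_all_squbes_200 : (List Int) × (List Int) := ([200], [200, 2005909453])

-- ===== CLAIM (what is proved, stated in full; the proofs are below) =====
def Claim_unchanged_all_squbes_200 : Prop := ∀ (n : Int), Dom_all_squbes_200 n → Pre_all_squbes_200 n → Spec_all_squbes_200 n (all_squbes_200 n)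
def Claim_changed_all_squbes_200 : Prop := Dom_all_squbes_200 (pvDiffWitness_all_squbes_200) ∧ Pre_all_squbes_200 (pvDiffWitness_all_squbes_200) ∧ D_all_squbes_200 (pvDiffWitness_all_squbes_200) ∧ all_squbes_200 (pvDiffWitness_all_squbes_200) = pvDiffWitnessOut_all_squbes_200.1 ∧ all_squbes_200_alt (pvDiffWitness_all_squbes_200) = pvDiffWitnessOut_all_squbes_200.2 ∧ pvDiffWitnessOut_all_squbes_200.1 ≠ pvDiffWitnessOut_all_squbes_200.2
def Claim_exact_all_squbes_200 : Prop := ∀ (n : Int), Dom_all_squbes_200 n → Pre_all_squbes_200 n → D_all_squbes_200 n → all_squbes_200 n ≠ all_squbes_200_alt n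

-- ===== LEMMAS AND PROOFS =====

-- ---- integer square root: pvIsqrt computes Nat.sqrt ----

theorem pvIsqrtAux_spec (m : Nat) : ∀ (fuel r : Nat), r * r ≤ m → m < (r + fuel) * (r + fuel) →
    pvIsqrtAux fuel m r * pvIsqrtAux fuel m r ≤ m ∧ m < (pvIsqrtAux fuel m r + 1) * (pvIsqrtAux fuel m r + 1) := by
  intro fuel
  induction fuel with
  | zero => intro r h1 h2; simp only [Nat.add_zero] at h2; omega
  | succ f ih =>
    intro r h1 h2
    rw [pvIsqrtAux]
    split
    · refine ih (r + 1) (by assumption) ?_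
      nlinarith [h2]
    · omega

theorem pvIsqrt_eq_sqrt (m : Nat) : pvIsqrt m = Nat.sqrt m := by
  have h := pvIsqrtAux_spec m (m + 1) 0 (by omega) (by nlinarith)
  rw [pvIsqrt] at *
  have h1 : pvIsqrtAux (m + 1) m 0 ≤ Nat.sqrt m := Nat.le_sqrt.mpr h.1
  have h2 : Nat.sqrt m < pvIsqrtAux (m + 1) m 0 + 1 := Nat.sqrt_lt.mpr h.2
  omega

-- ---- integer cube root: pv_icbrt brackets m between consecutive cubes ----

theorem pv_icbrtLoop_spec (m : Int) : ∀ (fuel : Nat) (r : Int), 0 ≤ r → r ^ 3 ≤ m → m < (r + fuel) ^ 3 →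
    0 ≤ pv_icbrtLoop fuel m r ∧ pv_icbrtLoop fuel m r ^ 3 ≤ m ∧ m < (pv_icbrtLoop fuel m r + 1) ^ 3 := by
  intro fuel
  induction fuel with
  | zero => intro r h0 h1 h2; simp only [Nat.cast_zero, add_zero] at h2; omega
  | succ f ih =>
    intro r h0 h1 h2
    rw [pv_icbrtLoop]
    split
    · refine ih (r + 1) (by omega) (by assumption) ?_
      have e : r + 1 + (f : Int) = r + ((f : Nat) + 1 : Nat) := by push_cast; ring
      rw [e]
      exact h2
    · exact ⟨h0, h1, by omega⟩

theorem pv_icbrt_spec (m : Int) (hm : 0 ≤ m) :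
    0 ≤ pv_icbrt m ∧ pv_icbrt m ^ 3 ≤ m ∧ m < (pv_icbrt m + 1) ^ 3 := by
  refine pv_icbrtLoop_spec m (m.toNat + 1) 0 le_rfl (by simpa using hm) ?_
  have h1 : ((m.toNat + 1 : Nat) : Int) = m + 1 := by omega
  rw [zero_add, h1]
  have h2 : (1 : Int) ≤ m + 1 := by omega
  calc m < m + 1 := by omega
    _ ≤ (m + 1) ^ 3 := le_self_pow₀ h2 (by norm_num)

-- the A-side exact cube root (Nat.findGreatest search) agrees with B's loop on the domain
theorem exCbrt_eq (n : Int) (h0 : 0 ≤ n) (h1 : n ≤ 2147483648) :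
    ((Nat.findGreatest (fun k => k ^ 3 ≤ n.toNat) 1291 : Nat) : Int) = pv_icbrt n := by
  obtain ⟨hc0, hc1, hc2⟩ := pv_icbrt_spec n h0
  set R := Nat.findGreatest (fun k => k ^ 3 ≤ n.toNat) 1291 with hR
  have hPR : R ^ 3 ≤ n.toNat :=
    Nat.findGreatest_spec (P := fun k => k ^ 3 ≤ n.toNat) (m := 0) (by omega) (by norm_num)
  have hcnat1 : (pv_icbrt n).toNat ^ 3 ≤ n.toNat := by
    rw [← Nat.cast_le (α := Int)]
    push_cast [Int.toNat_of_nonneg hc0, Int.toNat_of_nonneg h0]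
    exact hc1
  have hcnat2 : n.toNat < ((pv_icbrt n).toNat + 1) ^ 3 := by
    rw [← Nat.cast_lt (α := Int)]
    push_cast [Int.toNat_of_nonneg hc0, Int.toNat_of_nonneg h0]
    exact hc2
  have hnbound : n.toNat ≤ 2147483648 := by omega
  have hle : (pv_icbrt n).toNat ≤ R := by
    refine Nat.le_findGreatest ?_ hcnat1
    by_contra hgt
    push_neg at hgt
    have h3 : 1292 ^ 3 ≤ (pv_icbrt n).toNat ^ 3 := Nat.pow_le_pow_left (by omega) 3
    have h4 : (1292 : Nat) ^ 3 = 2156689088 := by norm_num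
    linarith
  have hge : R ≤ (pv_icbrt n).toNat := by
    by_contra hgt
    push_neg at hgt
    have h3 : ((pv_icbrt n).toNat + 1) ^ 3 ≤ R ^ 3 := Nat.pow_le_pow_left (by omega) 3
    linarith
  have hRe : R = (pv_icbrt n).toNat := le_antisymm hge hle
  rw [hRe, Int.toNat_of_nonneg hc0]

-- ---- the sieve array, pointwise ----

theorem foldl_set_len (L : List Int) (arr : List Bool) :
    (L.foldl (fun a l => a.set l.toNat false) arr).length = arr.length := by
  induction L generalizing arr with
  | nil => rfl
  | cons l L ih => simp [List.foldl_cons, ih, List.length_set]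

theorem foldl_set_getD (L : List Int) (arr : List Bool) (i : Nat) :
    (L.foldl (fun a l => a.set l.toNat false) arr).getD i false
      = if (∃ l ∈ L, l.toNat = i) ∧ i < arr.length then false else arr.getD i false := by
  induction L generalizing arr with
  | nil => simp
  | cons l L ih =>
    rw [List.foldl_cons, ih, List.length_set]
    have hset : (arr.set l.toNat false).getD i false
        = if l.toNat = i ∧ i < arr.length then false else arr.getD i false := by
      by_cases h : l.toNat = i
      · subst h
        by_cases hlen : l.toNat < arr.length
        · simp [List.getD_eq_getElem?_getD, List.getElem?_set, hlen]
        · have hnone : arr[l.toNat]? = none := by rw [List.getElem?_eq_none_iff]; omega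
          simp [List.getD_eq_getElem?_getD, List.getElem?_set, hlen, hnone]
      · simp [List.getD_eq_getElem?_getD, List.getElem?_set, h]
    rw [hset]
    simp only [List.mem_cons, exists_eq_or_imp]
    rcases Decidable.em (i < arr.length) with hlen | hlen
    · rcases Decidable.em (l.toNat = i) with hl | hl
      · simp [hl, hlen]
      · rcases Decidable.em (∃ x ∈ L, x.toNat = i) with hex | hex
        · simp [hl, hlen, hex]
        · simp [hl, hlen, hex]
    · simp [hlen]

-- ---- the number-theoretic content of one sieve pass ----

def SGood (s i : Nat) : Prop := 2 ≤ i ∧ ∀ d : Nat, 2 ≤ d → d ≤ s → d ∣ i → d = i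

theorem mult_cases (t i : Nat) (ht : 0 < t) (h : t ∣ i) : i = 0 ∨ i = t ∨ 2 * t ≤ i := by
  obtain ⟨c, rfl⟩ := h
  rcases c with _ | _ | c
  · left; rfl
  · right; left; omega
  · right; right; nlinarith

theorem good_mark (t i : Nat) (h2 : 2 ≤ t) :
    SGood t i ↔ SGood (t - 1) i ∧ ¬(t ∣ i ∧ 2 * t ≤ i) := by
  constructor
  · rintro ⟨hi, hg⟩
    refine ⟨⟨hi, fun d hd1 hd2 => hg d hd1 (by omega)⟩, ?_⟩
    rintro ⟨hdvd, hle⟩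
    have := hg t h2 le_rfl hdvd
    omega
  · rintro ⟨⟨hi, hg⟩, hm⟩
    refine ⟨hi, fun d hd1 hd2 hdvd => ?_⟩
    rcases Nat.lt_or_ge d t with hlt | hge
    · exact hg d hd1 (by omega) hdvd
    · have hdt : d = t := by omega
      subst hdt
      rcases mult_cases d i (by omega) hdvd with h | h | h
      · omega
      · omega
      · exact absurd ⟨hdvd, h⟩ hm

theorem good_skip (t i : Nat) (h2 : 2 ≤ t) (hcomp : ¬ SGood (t - 1) t) :
    SGood t i ↔ SGood (t - 1) i := by
  constructor
  · rintro ⟨hi, hg⟩; exact ⟨hi, fun d hd1 hd2 => hg d hd1 (by omega)⟩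
  · rintro ⟨hi, hg⟩
    refine ⟨hi, fun d hd1 hd2 hdvd => ?_⟩
    rcases Nat.lt_or_ge d t with hlt | hge
    · exact hg d hd1 (by omega) hdvd
    · have hdt : d = t := by omega
      subst hdt
      unfold SGood at hcomp
      push_neg at hcomp
      obtain ⟨e, he1, he2, he3, he4⟩ := hcomp h2
      rcases mult_cases d i (by omega) hdvd with h | h | h
      · omega
      · omega
      · have hei : e = i := hg e he1 he2 (he3.trans hdvd)
        omega

-- ---- the sieve invariant ----

def sieveArr0 (m : Int) : List Bool := [false, false] ++ List.replicate (m - 2).toNat true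

def sieveStep (m : Int) (arr : List Bool) (k : Int) : List Bool :=
  if arr.getD k.toNat false then
    (PySem.List.pyRange (2 * k) m k).foldl (fun a l => a.set l.toNat false) arr
  else arr

theorem sieve_inv (m : Int) (hm : 2 ≤ m) : ∀ u : Nat, 2 + (u : Int) ≤ (pvIsqrt m.toNat : Int) + 1 →
    ((PySem.List.pyRange 2 (2 + (u : Int)) 1).foldl (sieveStep m) (sieveArr0 m)).length = m.toNat ∧
    ∀ i : Nat, i < m.toNat →
      (((PySem.List.pyRange 2 (2 + (u : Int)) 1).foldl (sieveStep m) (sieveArr0 m)).getD i false = true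
        ↔ SGood (u + 1) i) := by
  intro u
  induction u with
  | zero =>
    intro _
    rw [show ((2 : Int) + ((0 : Nat) : Int)) = 2 by norm_num, PySem.List.pyRange_one_eq_nil le_rfl]
    rw [List.foldl_nil]
    constructor
    · simp only [sieveArr0, List.length_append, List.length_replicate, List.length_cons,
        List.length_nil]
      omega
    · intro i hi
      constructor
      · intro h
        refine ⟨?_, fun d hd1 hd2 => by omega⟩
        by_contra hlt
        push_neg at hlt
        interval_cases i <;>
          simp [sieveArr0, List.cons_append, List.getD_cons_zero, List.getD_cons_succ] at h
      · rintro ⟨hi2, _⟩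
        obtain ⟨j, rfl⟩ : ∃ j, i = j + 2 := ⟨i - 2, by omega⟩
        have hrep : j < (m - 2).toNat := by omega
        simp only [sieveArr0, List.cons_append, List.nil_append]
        rw [show j + 2 = (j + 1) + 1 by omega]
        rw [List.getD_cons_succ, List.getD_cons_succ]
        simp [List.getD_eq_getElem?_getD, List.getElem?_replicate, hrep]
  | succ u ih =>
    intro hu
    have hu' : 2 + (u : Int) ≤ (pvIsqrt m.toNat : Int) + 1 := by push_cast at hu ⊢; omega
    obtain ⟨ihlen, ihget⟩ := ih hu'
    have hsplit : PySem.List.pyRange 2 (2 + ((u + 1 : Nat) : Int)) 1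
        = PySem.List.pyRange 2 (2 + (u : Int)) 1 ++ [2 + (u : Int)] := by
      have e : (2 + ((u + 1 : Nat) : Int)) = (2 + (u : Int)) + 1 := by push_cast; ring
      rw [e, PySem.List.pyRange_one_succ_right (by omega)]
    rw [hsplit, List.foldl_append, List.foldl_cons, List.foldl_nil]
    set A := (PySem.List.pyRange 2 (2 + (u : Int)) 1).foldl (sieveStep m) (sieveArr0 m) with hA
    have hmnat : 2 ≤ m.toNat := by omega
    have htlt : u + 2 < m.toNat := by
      have hb1 : (u : Int) + 2 ≤ (pvIsqrt m.toNat : Int) := by push_cast at hu; omega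
      have hb2 : pvIsqrt m.toNat < m.toNat := by
        rw [pvIsqrt_eq_sqrt]; exact Nat.sqrt_lt_self (by omega)
      omega
    have htoNat : (2 + (u : Int)).toNat = u + 2 := by omega
    have hguard : A.getD (2 + (u : Int)).toNat false = true ↔ SGood (u + 1) (u + 2) := by
      rw [htoNat]; exact ihget (u + 2) htlt
    rw [sieveStep]
    by_cases hg : A.getD (2 + (u : Int)).toNat false = true
    · rw [if_pos hg]
      refine ⟨by rw [foldl_set_len, ihlen], ?_⟩
      intro i hi
      rw [foldl_set_getD, ihlen]
      have hmark : ((∃ l ∈ PySem.List.pyRange (2 * (2 + (u : Int))) m (2 + (u : Int)), l.toNat = i) ∧ i < m.toNat)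
          ↔ ((u + 2) ∣ i ∧ 2 * (u + 2) ≤ i) := by
        constructor
        · rintro ⟨⟨l, hl, rfl⟩, _⟩
          rw [PySem.List.mem_pyRange_iff_of_pos (by omega)] at hl
          obtain ⟨ha, hb, hc⟩ := hl
          have hdvd : (2 + (u : Int)) ∣ l := by
            have h2t : (2 + (u : Int)) ∣ 2 * (2 + (u : Int)) := dvd_mul_left _ 2
            have hsum := dvd_add hc h2t
            simpa using hsum
          have hl0 : 0 ≤ l := by omega
          constructor
          · have hcast : ((u + 2 : Nat) : Int) ∣ l := by push_cast; rwa [add_comm] at hdvd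
            rw [← Int.toNat_of_nonneg hl0] at hcast
            exact Int.natCast_dvd_natCast.mp hcast
          · omega
        · rintro ⟨hdvd, hle⟩
          refine ⟨⟨(i : Int), ?_, by omega⟩, hi⟩
          rw [PySem.List.mem_pyRange_iff_of_pos (by omega)]
          refine ⟨by omega, by omega, ?_⟩
          have hcast : ((u + 2 : Nat) : Int) ∣ (i : Int) := Int.natCast_dvd_natCast.mpr hdvd
          have h2 : (2 + (u : Int)) ∣ (i : Int) := by push_cast at hcast; rwa [add_comm] at hcast
          exact dvd_sub h2 (dvd_mul_left _ 2)
      by_cases hcond : (∃ l ∈ PySem.List.pyRange (2 * (2 + (u : Int))) m (2 + (u : Int)), l.toNat = i) ∧ i < m.toNat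
      · rw [if_pos hcond]
        have hmi := hmark.mp hcond
        constructor
        · intro hfalse; exact absurd hfalse (by simp)
        · intro hGood
          have hgm := (good_mark (u + 2) i (by omega)).mp hGood
          exact absurd hmi hgm.2
      · rw [if_neg hcond]
        rw [ihget i hi]
        have hnm : ¬ ((u + 2) ∣ i ∧ 2 * (u + 2) ≤ i) := fun h => hcond (hmark.mpr h)
        rw [good_mark (u + 2) i (by omega)]
        constructor
        · intro h; exact ⟨h, hnm⟩
        · intro h; exact h.1
    · rw [if_neg hg]
      refine ⟨ihlen, fun i hi => ?_⟩
      rw [ihget i hi]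
      have hcomp : ¬ SGood (u + 1) (u + 2) := fun h => hg (hguard.mpr h)
      rw [good_skip (u + 2) i (by omega) hcomp]
      exact Iff.rfl

-- ---- trial division tests primality; the sieve predicate is primality ----

theorem pv_is_prime_iff (k : Int) (hk : 0 ≤ k) : pv_is_prime k = true ↔ Nat.Prime k.toNat := by
  rw [pv_is_prime]
  by_cases h2 : k < 2
  · rw [if_pos h2]
    constructor
    · intro h; exact absurd h (by simp)
    · intro hp
      have := hp.two_le
      omega
  · rw [if_neg h2]
    push_neg at h2
    rw [List.all_eq_true]
    constructor
    · intro hall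
      rw [Nat.prime_def_le_sqrt]
      refine ⟨by omega, fun d hd1 hd2 hdvd => ?_⟩
      have hdk : ((d : Nat) : Int) ∈ PySem.List.pyRange 2 ((pvIsqrt k.toNat : Int) + 1) 1 := by
        rw [PySem.List.mem_pyRange_one, pvIsqrt_eq_sqrt]
        constructor
        · exact_mod_cast Nat.cast_le.mpr hd1
        · have hc : ((d : Nat) : Int) ≤ (Nat.sqrt k.toNat : Int) := Nat.cast_le.mpr hd2
          omega
      have hmod := hall _ hdk
      simp only [Bool.not_eq_eq_eq_not, Bool.not_true, beq_eq_false_iff_ne, ne_eq] at hmod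
      apply hmod
      rw [PySem.Int.mod_eq_zero_iff_dvd]
      have hdd : ((d : Nat) : Int) ∣ ((k.toNat : Nat) : Int) := Int.natCast_dvd_natCast.mpr hdvd
      rwa [Int.toNat_of_nonneg hk] at hdd
    · intro hp d hd
      rw [PySem.List.mem_pyRange_one, pvIsqrt_eq_sqrt] at hd
      simp only [Bool.not_eq_eq_eq_not, Bool.not_true, beq_eq_false_iff_ne, ne_eq]
      intro hmod
      rw [PySem.Int.mod_eq_zero_iff_dvd] at hmod
      have hd0 : 0 ≤ d := by omega
      have hdvdNat : d.toNat ∣ k.toNat := by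
        rw [← Int.natCast_dvd_natCast]
        rw [Int.toNat_of_nonneg hd0, Int.toNat_of_nonneg hk]
        exact hmod
      exact (Nat.prime_def_le_sqrt.mp hp).2 d.toNat (by omega) (by omega) hdvdNat

theorem sgood_iff_prime (m i : Nat) (hi : i < m) :
    SGood (Nat.sqrt m) i ↔ Nat.Prime i := by
  constructor
  · rintro ⟨hi2, hg⟩
    rw [Nat.prime_def_le_sqrt]
    refine ⟨hi2, fun d hd1 hd2 hdvd => ?_⟩
    have hdm : d ≤ Nat.sqrt m := hd2.trans (Nat.sqrt_le_sqrt (by omega))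
    have hei := hg d hd1 hdm hdvd
    have hlt : d < i := lt_of_le_of_lt hd2 (Nat.sqrt_lt_self (by omega))
    omega
  · intro hp
    refine ⟨hp.two_le, fun d hd1 _ hdvd => ?_⟩
    rcases (Nat.Prime.eq_one_or_self_of_dvd hp d hdvd) with h | h
    · omega
    · exact h

-- ---- the sieve equals the trial-division filter ----

theorem apbn_unfold (m : Int) : all_primes_below_n m
    = (PySem.List.pyRange 0 m 1).foldl
        (fun acc k =>
          if ((PySem.List.pyRange 2 ((pvIsqrt m.toNat : Int) + 1) 1).foldl (sieveStep m) (sieveArr0 m)).getD k.toNat false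
          then acc ++ [k] else acc) [] := rfl

theorem sieve_eq (m : Int) :
    all_primes_below_n m = (PySem.List.pyRange 0 m 1).filter pv_is_prime := by
  rcases Int.lt_or_le m 1 with hm | hm
  · rw [apbn_unfold]
    rw [PySem.List.pyRange_one_eq_nil (by omega : m ≤ 0)]
    rfl
  rcases Int.lt_or_le m 2 with hm2 | hm2
  · have he : m = 1 := by omega
    subst he
    decide
  -- main case: 2 ≤ m
  rw [apbn_unfold]
  have hs1 : 1 ≤ pvIsqrt m.toNat := by
    rw [pvIsqrt_eq_sqrt]
    have hone : 1 ≤ m.toNat := by omega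
    calc 1 = Nat.sqrt 1 := rfl
      _ ≤ Nat.sqrt m.toNat := Nat.sqrt_le_sqrt hone
  have hbound : (2 : Int) + ((pvIsqrt m.toNat - 1 : Nat) : Int) = (pvIsqrt m.toNat : Int) + 1 := by
    omega
  have hinv := sieve_inv m hm2 (pvIsqrt m.toNat - 1) (by rw [hbound])
  rw [hbound] at hinv
  obtain ⟨hlen, hget⟩ := hinv
  rw [PySem.List.foldl_append_if_eq_filter]
  rw [List.nil_append]
  apply List.filter_congr
  intro k hk
  rw [PySem.List.mem_pyRange_one] at hk
  have hk0 : 0 ≤ k := hk.1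
  have hklt : k.toNat < m.toNat := by omega
  have h1 := hget k.toNat hklt
  have h2 : pvIsqrt m.toNat - 1 + 1 = Nat.sqrt m.toNat := by
    rw [← pvIsqrt_eq_sqrt]; omega
  rw [h2] at h1
  have h3 : SGood (Nat.sqrt m.toNat) k.toNat ↔ Nat.Prime k.toNat :=
    sgood_iff_prime m.toNat k.toNat hklt
  have h4 := pv_is_prime_iff k hk0
  rw [Bool.eq_iff_iff, h1, h3, h4]

-- ---- the two product loops build the same list ----

theorem loops_eq (ps qs : List Int) :
    ps.foldl (fun acc p =>
      qs.foldl (fun acc q =>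
        if p ≠ q then
          if PySem.Str.isIn "200" (PySem.Int.toStr (p ^ 2 * q ^ 3)) then acc ++ [p ^ 2 * q ^ 3]
          else acc
        else acc) acc) []
    = ps.flatMap (fun p =>
        (qs.filter (fun q =>
            decide (p ≠ q) && PySem.Str.isIn "200" (PySem.Int.toStr (p ^ 2 * q ^ 3)))).map
          (fun q => p ^ 2 * q ^ 3)) := by
  have hinner : ∀ (p : Int) (acc : List Int),
      qs.foldl (fun acc q =>
        if p ≠ q then
          if PySem.Str.isIn "200" (PySem.Int.toStr (p ^ 2 * q ^ 3)) then acc ++ [p ^ 2 * q ^ 3]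
          else acc
        else acc) acc
      = acc ++ (qs.filter (fun q =>
            decide (p ≠ q) && PySem.Str.isIn "200" (PySem.Int.toStr (p ^ 2 * q ^ 3)))).map
          (fun q => p ^ 2 * q ^ 3) := by
    intro p acc
    rw [← PySem.List.foldl_append_if
      (fun q => decide (p ≠ q) && PySem.Str.isIn "200" (PySem.Int.toStr (p ^ 2 * q ^ 3)))
      (fun q => p ^ 2 * q ^ 3) qs acc]
    apply PySem.List.foldl_congr_mem
    intro acc q _
    by_cases hpq : p = q
    · simp [hpq]
    · simp [hpq]
  calc ps.foldl (fun acc p =>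
      qs.foldl (fun acc q =>
        if p ≠ q then
          if PySem.Str.isIn "200" (PySem.Int.toStr (p ^ 2 * q ^ 3)) then acc ++ [p ^ 2 * q ^ 3]
          else acc
        else acc) acc) []
      = ps.foldl (fun acc p => acc ++ (qs.filter (fun q =>
            decide (p ≠ q) && PySem.Str.isIn "200" (PySem.Int.toStr (p ^ 2 * q ^ 3)))).map
          (fun q => p ^ 2 * q ^ 3)) [] := by
        apply PySem.List.foldl_congr_mem
        intro acc p _
        exact hinner p acc
    _ = _ := by rw [PySem.List.foldl_append_eq_flatMap]; rfl

-- ---- every bad cube outside D_ either has a composite root, or is one of the two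
-- ---- prime-root cubes on which the dropped column contributes nothing ----

set_option maxRecDepth 100000 in
set_option maxHeartbeats 4000000 in
theorem bad_roots_classified :
    pvBadCbrtCubes.all (fun n => decide (D_all_squbes_200 n) || !pv_is_prime (pv_icbrt n)
      || decide (n = 300763) || decide (n = 357911)) = true := by
  decide

-- does NO square-prime p ≤ isqrt n give a '200'-sqube with the cube prime pv_icbrt n?
def pvNoNewCol (n : Int) : Bool :=
  ((PySem.List.pyRange 0 ((pvIsqrt n.toNat : Int) + 1) 1).filter pv_is_prime).all
    (fun p => !(decide (p ≠ pv_icbrt n)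
      && PySem.Str.isIn "200" (PySem.Int.toStr (p ^ 2 * pv_icbrt n ^ 3))))

set_option maxRecDepth 100000 in
set_option maxHeartbeats 4000000 in
theorem noNewCol_two : pvNoNewCol 300763 = true ∧ pvNoNewCol 357911 = true := by
  refine ⟨?_, ?_⟩ <;> decide

-- ---- adding one more cube prime: effect on the product list ----

theorem flatmap_len_aux (c : Int → Int → Bool) (f : Int → Int → Int) (ps qs : List Int) (p : Int) :
    (ps.flatMap (fun a => ((qs ++ [p]).filter (c a)).map (f a))).length
      = (ps.flatMap (fun a => (qs.filter (c a)).map (f a))).length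
        + ps.countP (fun a => c a p) := by
  induction ps with
  | nil => simp
  | cons a t ih =>
    rw [List.flatMap_cons, List.flatMap_cons, List.length_append, List.length_append,
      ih, List.countP_cons, List.filter_append, List.filter_singleton]
    cases h : c a p <;> simp [h] <;> omega

theorem flatmap_drop_aux (c : Int → Int → Bool) (f : Int → Int → Int) (ps qs : List Int) (p : Int)
    (hall : ∀ a ∈ ps, c a p = false) :
    ps.flatMap (fun a => ((qs ++ [p]).filter (c a)).map (f a))
      = ps.flatMap (fun a => (qs.filter (c a)).map (f a)) := by
  induction ps with
  | nil => rfl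
  | cons a t ih =>
    rw [List.flatMap_cons, List.flatMap_cons]
    rw [ih (fun x hx => hall x (List.mem_cons_of_mem a hx))]
    have h := hall a List.mem_cons_self
    rw [List.filter_append, List.filter_singleton]
    simp [h]

-- B's cube-prime list is A's plus the recovered prime at the end (on a bad cube with prime root)
theorem qsB_split (n : Int) (h0 : 0 ≤ n) (hpp : pv_is_prime (pv_icbrt n) = true) :
    (PySem.List.pyRange 0 (pv_icbrt n + 1) 1).filter pv_is_prime
      = (PySem.List.pyRange 0 (pv_icbrt n) 1).filter pv_is_prime ++ [pv_icbrt n] := by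
  have hc0 : 0 ≤ pv_icbrt n := (pv_icbrt_spec n h0).1
  rw [PySem.List.pyRange_one_succ_right hc0, List.filter_append]
  simp [List.filter, hpp]

-- ---- the verdict theorems ----

theorem tight_core (n q0 : Int) (h0 : 0 ≤ n) (h1 : n ≤ 2147483648)
    (hbad : n ∈ pvBadCbrtCubes) (hpp : pv_is_prime (pv_icbrt n) = true)
    (hq0 : 0 ≤ q0) (hq2 : q0 * q0 ≤ n) (hqp : pv_is_prime q0 = true)
    (hcond : (decide (q0 ≠ pv_icbrt n)
      && PySem.Str.isIn "200" (PySem.Int.toStr (q0 ^ 2 * pv_icbrt n ^ 3))) = true) :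
    all_squbes_200 n ≠ all_squbes_200_alt n := by
  intro heq
  have hex := exCbrt_eq n h0 h1
  simp only [all_squbes_200, all_squbes_200_alt] at heq
  rw [sieve_eq, sieve_eq, loops_eq] at heq
  have hA1 : floorCbrtFloat n + 1 = pv_icbrt n := by
    rw [floorCbrtFloat, if_pos hbad, hex]; ring
  rw [hA1, qsB_split n h0 hpp] at heq
  -- sorted lists are equal, so the underlying lists are permutations, so lengths agree
  set psqu := (PySem.List.pyRange 0 ((pvIsqrt n.toNat : Int) + 1) 1).filter pv_is_prime with hpsqu
  set qs0 := (PySem.List.pyRange 0 (pv_icbrt n) 1).filter pv_is_prime with hqs0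
  have hperm := ((PySem.List.sorted_perm (α := Int) (κ := Int) _ (fun x => x) false).symm.trans
    (heq ▸ PySem.List.sorted_perm (α := Int) (κ := Int) _ (fun x => x) false))
  have hlen := hperm.length_eq
  rw [flatmap_len_aux
      (fun a q => decide (a ≠ q) && PySem.Str.isIn "200" (PySem.Int.toStr (a ^ 2 * q ^ 3)))
      (fun a q => a ^ 2 * q ^ 3) psqu qs0 (pv_icbrt n)] at hlen
  have hcount : psqu.countP
      (fun a => decide (a ≠ pv_icbrt n)
        && PySem.Str.isIn "200" (PySem.Int.toStr (a ^ 2 * pv_icbrt n ^ 3))) = 0 := by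
    omega
  have hq0mem : q0 ∈ psqu := by
    rw [hpsqu, List.mem_filter]
    refine ⟨?_, hqp⟩
    rw [PySem.List.mem_pyRange_one]
    refine ⟨hq0, ?_⟩
    have hq2n : q0.toNat * q0.toNat ≤ n.toNat := by
      rw [← Nat.cast_le (α := Int)]
      push_cast [Int.toNat_of_nonneg hq0, Int.toNat_of_nonneg h0]
      exact hq2
    have hsq : q0.toNat ≤ Nat.sqrt n.toNat := Nat.le_sqrt.mpr hq2n
    rw [pvIsqrt_eq_sqrt]
    omega
  have := List.countP_eq_zero.mp hcount q0 hq0mem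
  simp only [hcond] at this
  exact absurd this (by simp)


-- ===== VERDICT (by name: the statement is the Claim_ definition above) =====
set_option maxRecDepth 1000000 in
set_option maxHeartbeats 4000000 in
theorem all_squbes_200_changed : Claim_changed_all_squbes_200 := by
  unfold Claim_changed_all_squbes_200; decide

theorem all_squbes_200_spec : Claim_unchanged_all_squbes_200 := by
  intro n hdom hpre hnd
  have h0 : 0 ≤ n := hpre
  have h1 : n ≤ 2147483648 := by
    simp only [Dom_all_squbes_200, pvDomInt, decide_eq_true_eq] at hdom
    exact hdom.2
  have hex := exCbrt_eq n h0 h1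
  have hc0 : 0 ≤ pv_icbrt n := (pv_icbrt_spec n h0).1
  show all_squbes_200 n = all_squbes_200_alt n
  simp only [all_squbes_200, all_squbes_200_alt]
  rw [sieve_eq, sieve_eq, loops_eq]
  by_cases hbad : n ∈ pvBadCbrtCubes
  case neg =>
    -- exact float cbrt: the two bounds coincide
    have hQ : floorCbrtFloat n + 1 = pv_icbrt n + 1 := by
      rw [floorCbrtFloat, if_neg hbad, hex]; ring
    rw [hQ]
  case pos =>
    have hA1 : floorCbrtFloat n + 1 = pv_icbrt n := by
      rw [floorCbrtFloat, if_pos hbad, hex]; ring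
    rw [hA1]
    by_cases hpp : pv_is_prime (pv_icbrt n) = true
    case neg =>
      -- composite root: the extra range cell is filtered out anyway
      have hcomp : pv_is_prime (pv_icbrt n) = false := by
        cases hval : pv_is_prime (pv_icbrt n)
        · rfl
        · exact absurd hval hpp
      have hQ : (PySem.List.pyRange 0 (pv_icbrt n + 1) 1).filter pv_is_prime
          = (PySem.List.pyRange 0 (pv_icbrt n) 1).filter pv_is_prime := by
        rw [PySem.List.pyRange_one_succ_right hc0, List.filter_append]
        simp [List.filter, hcomp]
      rw [hQ]
    case pos =>
      -- prime root, still equal: n is 300763 or 357911 and the extra column is empty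
      have htwo : n = 300763 ∨ n = 357911 := by
        have hall := List.all_eq_true.mp bad_roots_classified n hbad
        simp only [Bool.or_eq_true, decide_eq_true_eq, Bool.not_eq_true'] at hall
        rcases hall with ((h | h) | h) | h
        · exact absurd h hnd
        · rw [hpp] at h; exact absurd h (by simp)
        · exact Or.inl h
        · exact Or.inr h
      have hnocol : pvNoNewCol n = true := by
        rcases htwo with rfl | rfl
        · exact noNewCol_two.1
        · exact noNewCol_two.2
      rw [qsB_split n h0 hpp]
      refine congrArg (fun l => PySem.List.sorted l (fun x => x) false) ?_
      refine (flatmap_drop_aux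
        (fun a q => decide (a ≠ q) && PySem.Str.isIn "200" (PySem.Int.toStr (a ^ 2 * q ^ 3)))
        (fun a q => a ^ 2 * q ^ 3) _ _ (pv_icbrt n) ?_).symm
      intro a ha
      have hall := List.all_eq_true.mp hnocol a ha
      simp only [Bool.not_eq_eq_eq_not, Bool.not_true] at hall
      exact hall


set_option maxRecDepth 100000 in
set_option maxHeartbeats 4000000 in
theorem all_squbes_200_tight : Claim_exact_all_squbes_200 := by
  intro n hdom hpre hd
  simp only [D_all_squbes_200, List.mem_cons, List.mem_singleton, List.not_mem_nil,
    or_false] at hd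
  rcases hd with rfl | rfl | rfl | rfl | rfl | rfl | rfl | rfl | rfl | rfl | rfl | rfl | rfl |
    rfl | rfl | rfl | rfl | rfl | rfl | rfl | rfl | rfl | rfl | rfl | rfl | rfl | rfl | rfl | rfl
  · exact tight_core _ 199 (by norm_num) (by norm_num) (by decide) (by decide) (by norm_num) (by norm_num) (by decide) (by decide)
  · exact tight_core _ 863 (by norm_num) (by norm_num) (by decide) (by decide) (by norm_num) (by norm_num) (by decide) (by decide)
  · exact tight_core _ 1217 (by norm_num) (by norm_num) (by decide) (by decide) (by norm_num) (by norm_num) (by decide) (by decide)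
  · exact tight_core _ 283 (by norm_num) (by norm_num) (by decide) (by decide) (by norm_num) (by norm_num) (by decide) (by decide)
  · exact tight_core _ 293 (by norm_num) (by norm_num) (by decide) (by decide) (by norm_num) (by norm_num) (by decide) (by decide)
  · exact tight_core _ 5 (by norm_num) (by norm_num) (by decide) (by decide) (by norm_num) (by norm_num) (by decide) (by decide)
  · exact tight_core _ 263 (by norm_num) (by norm_num) (by decide) (by decide) (by norm_num) (by norm_num) (by decide) (by decide)
  · exact tight_core _ 251 (by norm_num) (by norm_num) (by decide) (by decide) (by norm_num) (by norm_num) (by decide) (by decide)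
  · exact tight_core _ 29 (by norm_num) (by norm_num) (by decide) (by decide) (by norm_num) (by norm_num) (by decide) (by decide)
  · exact tight_core _ 2 (by norm_num) (by norm_num) (by decide) (by decide) (by norm_num) (by norm_num) (by decide) (by decide)
  · exact tight_core _ 131 (by norm_num) (by norm_num) (by decide) (by decide) (by norm_num) (by norm_num) (by decide) (by decide)
  · exact tight_core _ 31 (by norm_num) (by norm_num) (by decide) (by decide) (by norm_num) (by norm_num) (by decide) (by decide)
  · exact tight_core _ 1123 (by norm_num) (by norm_num) (by decide) (by decide) (by norm_num) (by norm_num) (by decide) (by decide)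
  · exact tight_core _ 7 (by norm_num) (by norm_num) (by decide) (by decide) (by norm_num) (by norm_num) (by decide) (by decide)
  · exact tight_core _ 479 (by norm_num) (by norm_num) (by decide) (by decide) (by norm_num) (by norm_num) (by decide) (by decide)
  · exact tight_core _ 593 (by norm_num) (by norm_num) (by decide) (by decide) (by norm_num) (by norm_num) (by decide) (by decide)
  · exact tight_core _ 541 (by norm_num) (by norm_num) (by decide) (by decide) (by norm_num) (by norm_num) (by decide) (by decide)
  · exact tight_core _ 139 (by norm_num) (by norm_num) (by decide) (by decide) (by norm_num) (by norm_num) (by decide) (by decide)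
  · exact tight_core _ 5 (by norm_num) (by norm_num) (by decide) (by decide) (by norm_num) (by norm_num) (by decide) (by decide)
  · exact tight_core _ 181 (by norm_num) (by norm_num) (by decide) (by decide) (by norm_num) (by norm_num) (by decide) (by decide)
  · exact tight_core _ 41 (by norm_num) (by norm_num) (by decide) (by decide) (by norm_num) (by norm_num) (by decide) (by decide)
  · exact tight_core _ 457 (by norm_num) (by norm_num) (by decide) (by decide) (by norm_num) (by norm_num) (by decide) (by decide)
  · exact tight_core _ 631 (by norm_num) (by norm_num) (by decide) (by decide) (by norm_num) (by norm_num) (by decide) (by decide)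
  · exact tight_core _ 1087 (by norm_num) (by norm_num) (by decide) (by decide) (by norm_num) (by norm_num) (by decide) (by decide)
  · exact tight_core _ 331 (by norm_num) (by norm_num) (by decide) (by decide) (by norm_num) (by norm_num) (by decide) (by decide)
  · exact tight_core _ 311 (by norm_num) (by norm_num) (by decide) (by decide) (by norm_num) (by norm_num) (by decide) (by decide)
  · exact tight_core _ 883 (by norm_num) (by norm_num) (by decide) (by decide) (by norm_num) (by norm_num) (by decide) (by decide)
  · exact tight_core _ 131 (by norm_num) (by norm_num) (by decide) (by decide) (by norm_num) (by norm_num) (by decide) (by decide)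
  · exact tight_core _ 1187 (by norm_num) (by norm_num) (by decide) (by decide) (by norm_num) (by norm_num) (by decide) (by decide)
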